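-- pv_equiv track=rewrite | github.com/asari1018/PrefixSpan | del_elem_in_ptn.py | del_elem_in_ptn
-- ===== SOURCE A (Python) =====
-- def del_elem_in_ptn(del_element, pattern):
--     output = []
--     for i in range(len(pattern)):
--         output.append([])
--         for j in range(len(pattern[i])):
--             if pattern[i][j] != del_element:
--                 output[i].append(pattern[i][j])
--     for i in range(len(output)):
--         if not output[len(output)-i-1]:
--             del output[len(output)-i-1]
--     return output
-- ===== SOURCE B (Python) =====
-- # Single forward pass: append each filtered row only when non-empty (no second
-- # index-based deletion pass, no backwards negative indexing).
-- def del_elem_in_ptn(del_element, pattern):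
--     output = []
--     for sub in pattern:
--         filtered = [x for x in sub if x != del_element]
--         if filtered:
--             output.append(filtered)
--     return output
-- ===== Notes on version B (the rewrite author's own statement) =====
-- stated objective: simpler
-- what changed: One forward pass that appends each filtered row only when non-empty, replacing A's two-pass build-then-backwards-index-deletion structure; Pre_ admits every input on which A's deletion pass works (including the wraparound-cleaned cases) and excludes only the corner where that pass is broken: two consecutive rows filtering to empty other than as the final two rows, or a strict majority of emptied rows among >=3 rows, where A raises IndexError on many inputs and returns accidental values (keeping or dropping empty sublists) on the rest.
-- outside the precondition, e.g. on del_elem_in_ptn(0, [[], [], [5]]): A returns [[], [5]], B returns [[5]]; on del_elem_in_ptn(0, [[5], [0], [0], [5]]): A returns [[5], [], [5]], B returns [[5], [5]]; on del_elem_in_ptn(0, [[], [5], [6], [], [], [7]]): A returns [[5], [6], [7]], B returns [[5], [6], [7]]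
import Mathlib
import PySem

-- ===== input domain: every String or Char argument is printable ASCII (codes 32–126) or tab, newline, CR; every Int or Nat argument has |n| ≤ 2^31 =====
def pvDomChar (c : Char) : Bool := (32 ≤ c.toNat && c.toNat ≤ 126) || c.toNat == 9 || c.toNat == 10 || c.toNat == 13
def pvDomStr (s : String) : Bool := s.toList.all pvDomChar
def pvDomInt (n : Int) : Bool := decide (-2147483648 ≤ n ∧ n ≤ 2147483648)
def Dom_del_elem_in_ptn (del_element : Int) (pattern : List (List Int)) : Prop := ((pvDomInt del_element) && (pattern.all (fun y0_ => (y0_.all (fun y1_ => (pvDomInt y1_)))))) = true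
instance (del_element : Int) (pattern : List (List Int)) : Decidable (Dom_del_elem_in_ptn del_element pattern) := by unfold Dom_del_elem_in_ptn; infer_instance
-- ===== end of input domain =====

-- B: one forward pass appending each non-empty filtered row, instead of A's two-pass
-- build-then-backwards-index-deletion; proven equal on every input where A's second
-- pass behaves (Pre_ excludes only the corner where its shrinking-list index arithmetic
-- raises IndexError or accidentally keeps/drops rows).


-- ===== PORT A =====
-- inner loop 'for j in range(len(pattern[i])): if pattern[i][j] != del_element: output[i].append(pattern[i][j])'
-- (the outer loop index i is ≥ 0 and in range, so 'output[i] = …' is exactly '.set i.toNat')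
def pvAInner (del_element : Int) (i : Int) (row : List Int) (output : List (List Int)) : List (List Int) :=
  (PySem.List.pyRange 0 row.length 1).foldl
    (fun out j =>
      if PySem.List.pyGetD row j 0 ≠ del_element then
        out.set i.toNat ((PySem.List.pyGetD out i []) ++ [PySem.List.pyGetD row j 0])
      else out)
    output

-- one iteration of 'for i in range(len(output)): if not output[len(output)-i-1]: del output[len(output)-i-1]'
-- (pyGet? = none is exactly where Python raises IndexError; those inputs lie outside Pre_)
def pvADelStep (output : List (List Int)) (i : Int) : List (List Int) :=
  match PySem.List.pyGet? output ((output.length : Int) - i - 1) with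
  | none => output
  | some row =>
    if row = [] then
      match PySem.List.pop? output ((output.length : Int) - i - 1) with
      | none => output
      | some (_, rest) => rest
    else output

-- the deletion loop: 'for i in range(len(output)): …' over the list built by the first pass
def pvADelLoop (output : List (List Int)) : List (List Int) :=
  (PySem.List.pyRange 0 output.length 1).foldl pvADelStep output

def del_elem_in_ptn (del_element : Int) (pattern : List (List Int)) : List (List Int) :=
  pvADelLoop
    ((PySem.List.pyRange 0 pattern.length 1).foldl
      (fun output i => pvAInner del_element i (PySem.List.pyGetD pattern i []) (output ++ [[]]))
      [])

-- ===== PORT B =====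
def del_elem_in_ptn_alt (del_element : Int) (pattern : List (List Int)) : List (List Int) :=
  pattern.foldl
    (fun output sub =>
      let filtered := sub.filter (fun x => x ≠ del_element)
      if filtered = [] then output else output ++ [filtered])
    []

-- ===== PRECONDITION & SPEC =====
-- linear scans for two adjacent 'true' flags (anywhere / not in the final position pair)
def pvAdjB : List Bool → Bool
  | [] => false
  | a :: t =>
    match t with
    | b :: _ => (a && b) || pvAdjB t
    | [] => false

def pvAdjInnerB : List Bool → Bool
  | [] => false
  | a :: t =>
    match t with
    | b :: _ :: _ => (a && b) || pvAdjInnerB t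
    | _ => false

-- Pre_ admits exactly the inputs on which A's backwards deletion pass works: either no two
-- consecutive rows filter to empty (and such rows are not a strict majority of ≥3 rows, where
-- the pass underflows and raises IndexError), or the only two are the final two rows (which the
-- wraparound access output[-1] still cleans up). It excludes the remaining corner — two
-- consecutive emptied rows elsewhere, or a strict emptied majority — where the same broken
-- index arithmetic raises IndexError on many inputs and on the rest returns a value that keeps
-- or drops empty sublists by accident of double negative-index wraparound.
def Pre_del_elem_in_ptn (del_element : Int) (pattern : List (List Int)) : Prop :=
  (pvAdjB (pattern.map (fun s => s.all (fun x => x = del_element))) = false ∧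
    (2 * pattern.countP (fun s => s.all (fun x => x = del_element)) ≤ pattern.length ∨
      pattern.countP (fun s => s.all (fun x => x = del_element)) ≤ 1 ∨
      pattern.length ≤ 2)) ∨
  (pvAdjInnerB (pattern.map (fun s => s.all (fun x => x = del_element))) = false ∧
    pvAdjB (pattern.map (fun s => s.all (fun x => x = del_element))) = true ∧
    pattern.countP (fun s => s.all (fun x => x = del_element)) = 2)
instance (del_element : Int) (pattern : List (List Int)) : Decidable (Pre_del_elem_in_ptn del_element pattern) := by unfold Pre_del_elem_in_ptn; infer_instance

def pvWitness_del_elem_in_ptn : Int × List (List Int) := (0, [[1], [0], [2]])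

def Spec_del_elem_in_ptn (del_element : Int) (pattern : List (List Int)) (out : List (List Int)) : Prop := out = del_elem_in_ptn_alt del_element pattern
instance (del_element : Int) (pattern : List (List Int)) (out : List (List Int)) : Decidable (Spec_del_elem_in_ptn del_element pattern out) := by unfold Spec_del_elem_in_ptn; infer_instance

-- ===== CLAIM (what is proved, stated in full; the proofs are below) =====
def Claim_equal_del_elem_in_ptn : Prop := ∀ (del_element : Int) (pattern : List (List Int)), Dom_del_elem_in_ptn del_element pattern → Pre_del_elem_in_ptn del_element pattern → Spec_del_elem_in_ptn del_element pattern (del_elem_in_ptn del_element pattern)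

-- ===== LEMMAS AND PROOFS =====

theorem pvWitness_ok : Dom_del_elem_in_ptn pvWitness_del_elem_in_ptn.1 pvWitness_del_elem_in_ptn.2 ∧ Pre_del_elem_in_ptn pvWitness_del_elem_in_ptn.1 pvWitness_del_elem_in_ptn.2 := by
  constructor <;> decide

-- setting at the last position
theorem setlast (pre : List (List Int)) (r v : List Int) : (pre ++ [r]).set pre.length v = pre ++ [v] := by
  induction pre with
  | nil => rfl
  | cons a t ih => simp [ih]

-- A's inner loop, seen over the row's elements, appends the kept elements to the row at index pre.length
theorem innerGen (d : Int) (row : List Int) : ∀ (pre : List (List Int)) (r : List Int),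
    row.foldl (fun out x => if x ≠ d then out.set ((pre.length : Int)).toNat ((PySem.List.pyGetD out (pre.length : Int) []) ++ [x]) else out) (pre ++ [r])
      = pre ++ [r ++ row.filter (fun x => x ≠ d)] := by
  induction row with
  | nil => intro pre r; simp
  | cons x t ih =>
    intro pre r
    rw [List.foldl_cons]
    have hstep : (if x ≠ d then (pre ++ [r]).set ((pre.length : Int)).toNat ((PySem.List.pyGetD (pre ++ [r]) (pre.length : Int) []) ++ [x]) else (pre ++ [r]))
        = pre ++ [if x = d then r else r ++ [x]] := by
      by_cases hx : x = d
      · rw [if_neg (by simp [hx]), if_pos hx]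
      · rw [if_pos hx, if_neg hx]
        have h1 : PySem.List.pyGetD (pre ++ [r]) (pre.length : Int) [] = r := by simp
        have h2 : ((pre.length : Int)).toNat = pre.length := by simp
        rw [h1, h2, setlast]
    rw [hstep, ih pre _]
    by_cases hx : x = d <;> simp [hx]

theorem pvAInner_eq (d : Int) (row : List Int) (acc : List (List Int)) :
    pvAInner d (acc.length : Int) row (acc ++ [[]]) = acc ++ [row.filter (fun x => x ≠ d)] := by
  unfold pvAInner
  have h : (PySem.List.pyRange 0 (row.length : Int) 1).foldl
      (fun out j =>
        if PySem.List.pyGetD row j 0 ≠ d then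
          out.set ((acc.length : Int)).toNat ((PySem.List.pyGetD out (acc.length : Int) []) ++ [PySem.List.pyGetD row j 0])
        else out) (acc ++ [[]])
      = row.foldl (fun out x => if x ≠ d then out.set ((acc.length : Int)).toNat ((PySem.List.pyGetD out (acc.length : Int) []) ++ [x]) else out) (acc ++ [[]]) :=
    PySem.List.foldl_pyRange_zero_pyGetD' row 0
      (fun out x => if x ≠ d then out.set ((acc.length : Int)).toNat ((PySem.List.pyGetD out (acc.length : Int) []) ++ [x]) else out)
      (acc ++ [[]])
  rw [h]
  rw [innerGen d row acc []]
  simp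

-- A's first pass over any suffix of the pattern
theorem outerGen (d : Int) (full : List (List Int)) : ∀ (tail : List (List Int)) (k : Nat) (acc : List (List Int)),
    full.drop k = tail → acc.length = k →
    (PySem.List.pyRange (k : Int) (full.length : Int) 1).foldl
      (fun output i => pvAInner d i (PySem.List.pyGetD full i []) (output ++ [[]])) acc
      = acc ++ tail.map (fun s => s.filter (fun x => x ≠ d)) := by
  intro tail
  induction tail with
  | nil =>
    intro k acc hd hl
    have hk : full.length ≤ k := by
      by_contra h
      have h2 := List.drop_eq_getElem_cons (l := full) (by omega : k < full.length)
      rw [hd] at h2; simp at h2; omega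
    rw [PySem.List.pyRange_one_eq_nil (by exact_mod_cast hk)]
    simp
  | cons r rest ih =>
    intro k acc hd hl
    have hk : k < full.length := by
      by_contra h
      rw [List.drop_eq_nil_of_le (by omega)] at hd; simp at hd
    have hcons : full[k] :: full.drop (k+1) = r :: rest := by
      rw [← List.drop_eq_getElem_cons hk, hd]
    injection hcons with hr hrest
    rw [PySem.List.pyRange_one_cons (by exact_mod_cast hk)]
    rw [List.foldl_cons]
    have hget : PySem.List.pyGetD full (k : Int) [] = r := by
      rw [PySem.List.pyGetD_natCast]
      rw [List.getD_eq_getElem?_getD, List.getElem?_eq_getElem hk, hr]; rfl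
    have hinner : pvAInner d (k : Int) (PySem.List.pyGetD full (k : Int) []) (acc ++ [[]])
        = acc ++ [r.filter (fun x => x ≠ d)] := by
      rw [hget, ← hl]
      exact pvAInner_eq d r acc
    rw [hinner]
    have hih := ih (k+1) (acc ++ [r.filter (fun x => x ≠ d)]) hrest (by simp [hl])
    rw [show ((k : Int) + 1) = ((k+1 : Nat) : Int) by push_cast; ring] at *
    rw [hih]
    simp

-- A's first pass builds exactly 'map filter'
theorem phase1_eq_map (d : Int) (pattern : List (List Int)) :
    (PySem.List.pyRange 0 pattern.length 1).foldl
      (fun output i => pvAInner d i (PySem.List.pyGetD pattern i []) (output ++ [[]])) []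
      = pattern.map (fun s => s.filter (fun x => x ≠ d)) := by
  have h := outerGen d pattern pattern 0 [] rfl rfl
  rw [Nat.cast_zero] at h
  simpa using h

theorem eraseIdx_mid (X Y : List (List Int)) (r : List Int) : (X ++ r :: Y).eraseIdx X.length = X ++ Y := by
  induction X with
  | nil => rfl
  | cons a t ih => simp [ih]

theorem pop_mid (X Y : List (List Int)) (r : List Int) : PySem.List.pop? (X ++ r :: Y) (X.length : Int) = some (r, X ++ Y) := by
  have h := PySem.List.pop?_natCast (X ++ r :: Y) X.length (by simp)
  rw [h, eraseIdx_mid]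
  congr 1
  simp

theorem filter_self_of (l : List (List Int)) (h : ∀ r ∈ l, r ≠ []) : l.filter (fun r => r ≠ []) = l := by
  apply List.filter_eq_self.mpr
  intro a ha; simpa using h a ha

-- a deletion step is the identity whenever the row it reads is non-empty (or the index is out of range)
theorem delStep_id (output : List (List Int)) (i : Int)
    (h : ∀ r, PySem.List.pyGet? output ((output.length : Int) - i - 1) = some r → r ≠ []) :
    pvADelStep output i = output := by
  unfold pvADelStep
  cases hg : PySem.List.pyGet? output ((output.length : Int) - i - 1) with
  | none => rfl
  | some row => simp [h row hg]

theorem foldl_delStep_id (F : List (List Int)) (l : List Int)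
    (h : ∀ i ∈ l, ∀ r, PySem.List.pyGet? F ((F.length : Int) - i - 1) = some r → r ≠ []) :
    l.foldl pvADelStep F = F := by
  induction l with
  | nil => rfl
  | cons a t ih =>
    rw [List.foldl_cons, delStep_id F a (h a (by simp))]
    exact ih (fun i hi => h i (by simp [hi]))

theorem foldl_delStep_id_all (F : List (List Int)) (l : List Int) (h : ∀ r ∈ F, r ≠ []) :
    l.foldl pvADelStep F = F := by
  apply foldl_delStep_id
  intro i _ r hr
  exact h r (PySem.List.mem_of_pyGet?_eq_some F hr)

-- a deletion step at an in-range index pointing at an empty row pops it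
theorem delStep_pop (output : List (List Int)) (i : Int) (X Y : List (List Int))
    (hout : output = X ++ [] :: Y)
    (hidx : ((output.length : Int) - i - 1) = (X.length : Int)) :
    pvADelStep output i = X ++ Y := by
  subst hout
  unfold pvADelStep
  rw [hidx, PySem.List.pyGet?_append_length]
  simp [pop_mid]

theorem take_succ_getElem (l : List (List Int)) (n : Nat) (h : n < l.length) :
    l.take (n+1) = l.take n ++ [l[n]] := by
  rw [List.take_add_one, List.getElem?_eq_getElem h]
  rfl

-- ===== the second pass when no two consecutive rows are empty =====
-- invariant: after scanning the suffix 'drop k' the list is 'take k ++ (drop k).filter',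
-- the loop counter is n - k - (#empties seen), and the final result is 'F.filter'
theorem delInv (F : List (List Int))
    (hAdj : ∀ i : Nat, i + 1 < F.length → F.getD i [] = [] → F.getD (i+1) [] ≠ []) :
    ∀ k : Nat, k ≤ F.length →
    (PySem.List.pyRange ((F.length : Int) - k - ((F.drop k).countP (fun r => r = []) : Nat)) (F.length : Int) 1).foldl
        pvADelStep (F.take k ++ (F.drop k).filter (fun r => r ≠ []))
      = F.filter (fun r => r ≠ []) := by
  intro k
  induction k using Nat.strong_induction_on with
  | _ k ih =>
    intro hk
    match k, ih with
    | 0, _ =>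
      simp only [List.drop_zero, List.take_zero, List.nil_append]
      apply foldl_delStep_id_all
      intro r hr
      have := List.of_mem_filter hr
      simpa using this
    | k' + 1, ih =>
      have hk' : k' < F.length := by omega
      set n := F.length with hn
      set d := ((F.drop (k'+1)).countP (fun r => r = [])) with hd
      have hdle : d ≤ n - (k'+1) := by
        have := List.countP_le_length (l := F.drop (k'+1)) (p := fun r => decide (r = []))
        simpa [hd] using this
      have hstart : ((n : Int) - ((k'+1 : Nat) : Int) - (d : Int)) < (n : Int) := by push_cast; omega
      rw [PySem.List.pyRange_one_cons hstart, List.foldl_cons]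
      set C := F.take (k'+1) ++ (F.drop (k'+1)).filter (fun r => r ≠ []) with hC
      have hfl : ((F.drop (k'+1)).filter (fun r => r ≠ [])).length = (n - (k'+1)) - d := by
        have h1 : ((F.drop (k'+1)).filter (fun r => r ≠ [])).length
            = (F.drop (k'+1)).countP (fun r => r ≠ []) := by
          rw [← List.countP_eq_length_filter]
        have h2 : (F.drop (k'+1)).length = (F.drop (k'+1)).countP (fun r => r = []) + (F.drop (k'+1)).countP (fun r => ¬ (r = [])) := by
          have := List.length_eq_countP_add_countP (p := fun r : List Int => decide (r = [])) (l := F.drop (k'+1))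
          simpa using this
        have h3 : (F.drop (k'+1)).length = n - (k'+1) := by simp [hn]
        have h4 : (F.drop (k'+1)).countP (fun r => r ≠ []) = (F.drop (k'+1)).countP (fun r => ¬ (r = [])) := by
          apply List.countP_congr; intro a _; simp
        omega
      have hClen : C.length = n - d - 1 + 1 := by
        simp only [hC, List.length_append, List.length_take]
        have : min (k'+1) n = k'+1 := by omega
        rw [this, hfl]; omega
      have hidx : ((C.length : Int) - ((n : Int) - ((k'+1 : Nat) : Int) - (d : Int)) - 1) = (k' : Int) := by
        rw [hClen]; push_cast; omega
      have hsplit : F.take (k'+1) = F.take k' ++ [F[k']] := take_succ_getElem F k' hk'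
      by_cases hrow : F[k'] = []
      · -- delete F[k'] and skip F[k'-1]
        have hCshape : C = F.take k' ++ [] :: (F.drop (k'+1)).filter (fun r => r ≠ []) := by
          rw [hC, hsplit, hrow]
          simp
        have hstep : pvADelStep C ((n : Int) - ((k'+1 : Nat) : Int) - (d : Int)) = F.take k' ++ (F.drop (k'+1)).filter (fun r => r ≠ []) := by
          apply delStep_pop _ _ _ _ hCshape
          rw [hidx]
          simp only [List.length_take]
          congr 1
          omega
        rw [hstep]
        have hdropk' : F.drop k' = F[k'] :: F.drop (k'+1) := List.drop_eq_getElem_cons hk'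
        match k', hk', hsplit, hstep, hdropk', hrow, ih with
        | 0, _, _, _, hdropk', hrow, _ =>
          -- whole list scanned; the rest of the steps are the identity on F.filter
          have hF0 : F = F[0] :: F.drop (0+1) := by
            have h := hdropk'
            rwa [List.drop_zero] at h
          have hFfil : F.filter (fun r => r ≠ []) = (F.drop (0+1)).filter (fun r => r ≠ []) := by
            conv_lhs => rw [hF0]
            rw [List.filter_cons]
            simp
            exact hrow
          simp only [List.take_zero, List.nil_append]
          rw [← hFfil]
          apply foldl_delStep_id_all
          intro r hr
          have := List.of_mem_filter hr
          simpa using this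
        | j + 1, hk', hsplit, hstep, hdropk', hrow, ih =>
          -- F[j] is non-empty (no two adjacent empties), invariant re-established at j
          have hFj : F[j] ≠ [] := by
            intro hj
            have h1 : F.getD j [] = [] := by rw [List.getD_eq_getElem _ _ (by omega)]; exact hj
            have h2 := hAdj j (by omega) h1
            rw [List.getD_eq_getElem _ _ (by omega)] at h2
            exact h2 hrow
          have hdropj : F.drop j = F[j] :: F.drop (j+1) := List.drop_eq_getElem_cons (by omega)
          have hcnt : (F.drop j).countP (fun r => r = []) = d + 1 := by
            rw [hdropj, List.countP_cons, hdropk', List.countP_cons]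
            simp [hFj, hrow, hd]
          have hlist : F.take j ++ (F.drop j).filter (fun r => r ≠ [])
              = F.take (j+1) ++ (F.drop (j+1+1)).filter (fun r => r ≠ []) := by
            rw [hdropj, List.filter_cons, if_pos (by simpa using hFj), hdropk', List.filter_cons, if_neg (by simpa using hrow)]
            rw [take_succ_getElem F j (by omega)]
            simp only [List.append_assoc, List.cons_append, List.nil_append]
          have h := ih j (by omega) (by omega)
          rw [hlist] at h
          convert h using 3
          rw [hcnt]
          push_cast
          omega
      · -- keep F[k']: identity step, invariant re-established at k'
        have hstep : pvADelStep C ((n : Int) - ((k'+1 : Nat) : Int) - (d : Int)) = C := by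
          apply delStep_id
          intro r hr
          rw [hidx] at hr
          rw [PySem.List.pyGet?_natCast] at hr
          have hklen : k' < (F.take (k'+1)).length := by
            simp only [List.length_take]
            omega
          rw [hC, List.getElem?_append_left hklen] at hr
          rw [List.getElem?_eq_getElem hklen] at hr
          have hkt : (F.take (k'+1))[k'] = F[k'] := List.getElem_take
          rw [hkt] at hr
          cases hr
          exact hrow
        rw [hstep]
        have hdropk' : F.drop k' = F[k'] :: F.drop (k'+1) := List.drop_eq_getElem_cons hk'
        have hcnt : (F.drop k').countP (fun r => r = []) = d := by
          rw [hdropk', List.countP_cons]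
          simp [hrow, hd]
        have hlist : F.take k' ++ (F.drop k').filter (fun r => r ≠ []) = C := by
          rw [hC, hdropk', List.filter_cons, if_pos (by simpa using hrow), hsplit]
          simp only [List.append_assoc, List.cons_append, List.nil_append]
        have h := ih k' (by omega) (by omega)
        rw [hlist] at h
        convert h using 3
        rw [hcnt]
        push_cast
        omega

-- with no two consecutive empty rows, A's deletion loop = filter
theorem delLoop_noAdj (F : List (List Int))
    (hAdj : ∀ i : Nat, i + 1 < F.length → F.getD i [] = [] → F.getD (i+1) [] ≠ []) :
    pvADelLoop F = F.filter (fun r => r ≠ []) := by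
  have h := delInv F hAdj F.length le_rfl
  unfold pvADelLoop
  simpa using h

-- when the only empty rows are the final two: the first is popped at once, the second by the
-- wraparound access output[-1] on the final iteration
theorem delLoop_trailing (X : List (List Int)) (hX : ∀ r ∈ X, r ≠ []) :
    pvADelLoop (X ++ [[], []]) = X := by
  unfold pvADelLoop
  set m := X.length with hm
  have hlen : (X ++ [[], []]).length = m + 2 := by simp [hm]
  rw [hlen]
  have h0 : (0 : Int) < ((m + 2 : Nat) : Int) := by push_cast; omega
  rw [PySem.List.pyRange_one_cons h0, List.foldl_cons]
  have hshape : X ++ [[], []] = (X ++ [[]]) ++ [] :: [] := by simp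
  have hstep0 : pvADelStep (X ++ [[], []]) 0 = (X ++ [[]]) ++ [] := by
    apply delStep_pop _ _ _ _ hshape
    simp only [List.length_append, List.length_cons, List.length_nil]
    push_cast
    ring
  rw [hstep0]
  have hsplit : PySem.List.pyRange (0+1) ((m+2 : Nat) : Int) 1
      = PySem.List.pyRange 1 ((m : Int) + 1) 1 ++ PySem.List.pyRange ((m : Int) + 1) ((m : Int) + 2) 1 := by
    rw [show ((m+2 : Nat) : Int) = (m : Int) + 2 by push_cast; ring]
    exact PySem.List.pyRange_one_append 1 ((m : Int) + 1) ((m : Int) + 2) (by omega) (by omega)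
  rw [hsplit, List.foldl_append]
  have hmid : (PySem.List.pyRange 1 ((m : Int) + 1) 1).foldl pvADelStep ((X ++ [[]]) ++ []) = X ++ [[]] := by
    simp only [List.append_nil]
    apply foldl_delStep_id
    intro i hi r hr
    have hmem := (PySem.List.mem_pyRange_one).mp hi
    have hlen1 : ((X ++ [[]]).length : Int) = (m : Int) + 1 := by simp [hm]
    rw [hlen1] at hr
    have hnn : (0 : Int) ≤ (m : Int) + 1 - i - 1 := by omega
    rw [PySem.List.pyGet?_of_nonneg _ hnn] at hr
    have htn : ((m : Int) + 1 - i - 1).toNat < X.length := by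
      rw [hm]; omega
    rw [List.getElem?_append_left htn] at hr
    rw [List.getElem?_eq_getElem htn] at hr
    cases hr
    exact hX _ (List.getElem_mem htn)
  rw [show ((X ++ [[]]) ++ [] : List (List Int)) = X ++ [[]] by simp] at hmid ⊢
  rw [hmid]
  have hsing : PySem.List.pyRange ((m : Int) + 1) ((m : Int) + 2) 1 = [(m : Int) + 1] := by
    rw [show ((m : Int) + 2) = ((m : Int) + 1) + 1 by ring]
    exact PySem.List.pyRange_one_singleton _
  rw [hsing, List.foldl_cons, List.foldl_nil]
  unfold pvADelStep
  have hlen1 : (((X ++ [[]]).length : Int)) = (m : Int) + 1 := by simp [hm]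
  have hidx : (((X ++ [[]]).length : Int)) - ((m : Int) + 1) - 1 = -1 := by rw [hlen1]; ring
  rw [hidx, PySem.List.pyGet?_neg_one_append_singleton]
  simp [PySem.List.pop?_last]

-- B is 'filter non-empty of map filter'
theorem altGen (d : Int) (l : List (List Int)) (acc : List (List Int)) :
    l.foldl (fun acc sub => if sub.filter (fun x => x ≠ d) = [] then acc else acc ++ [sub.filter (fun x => x ≠ d)]) acc
      = acc ++ (l.filter (fun s => s.filter (fun x => x ≠ d) ≠ [])).map (fun s => s.filter (fun x => x ≠ d)) := by
  have h := PySem.List.foldl_append_if (l := l) (acc := acc)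
    (p := fun s : List Int => s.filter (fun x => x ≠ d) ≠ []) (f := fun s : List Int => s.filter (fun x => x ≠ d))
  rw [← h]
  apply PySem.List.foldl_congr_mem
  intro a x _
  by_cases hx : x.filter (fun x => x ≠ d) = []
  · rw [if_pos hx, if_neg (by simpa [List.filter_eq_nil_iff] using hx)]
  · rw [if_neg hx, if_pos (by
      rw [List.filter_eq_nil_iff] at hx
      push_neg at hx
      simpa using hx)]

theorem alt_eq_filter_map (d : Int) (pattern : List (List Int)) :
    del_elem_in_ptn_alt d pattern
      = (pattern.map (fun s => s.filter (fun x => x ≠ d))).filter (fun r => r ≠ []) := by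
  show pattern.foldl (fun acc sub => if sub.filter (fun x => x ≠ d) = [] then acc else acc ++ [sub.filter (fun x => x ≠ d)]) [] = _
  rw [altGen, List.filter_map]
  simp only [List.nil_append]
  rfl

-- a row filters to empty iff all its elements equal del_element
theorem emptyRow_iff (d : Int) (s : List Int) :
    s.filter (fun x => x ≠ d) = [] ↔ s.all (fun x => x = d) = true := by
  simp [List.filter_eq_nil_iff, List.all_eq_true]

theorem countP_bridge (d : Int) (pattern : List (List Int)) :
    (pattern.map (fun s => s.filter (fun x => x ≠ d))).countP (fun r => r = [])
      = pattern.countP (fun s => s.all (fun x => x = d)) := by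
  rw [List.countP_map]
  apply List.countP_congr
  intro s _
  simp [Function.comp_def, List.filter_eq_nil_iff, List.all_eq_true]

-- the zip-based adjacency tests of D_, read off by index
theorem adj_any_iff (d : Int) (l : List (List Int)) :
    ((l.zip l.tail).any (fun p => p.1.all (fun x => x = d) && p.2.all (fun x => x = d)) = true)
      ↔ ∃ i : Nat, i + 1 < l.length ∧ (l.getD i []).all (fun x => x = d) = true ∧ (l.getD (i+1) []).all (fun x => x = d) = true := by
  have hlen : (l.zip l.tail).length = l.length - 1 := by
    rw [List.length_zip, List.length_tail]
    omega
  rw [List.any_eq_true]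
  constructor
  · rintro ⟨p, hp, hq⟩
    obtain ⟨i, hi, hgi⟩ := List.mem_iff_getElem.mp hp
    have hi1 : i + 1 < l.length := by omega
    rw [List.getElem_zip, List.getElem_tail (by rw [List.length_tail]; omega)] at hgi
    rw [← hgi] at hq
    simp only [Bool.and_eq_true] at hq
    refine ⟨i, hi1, ?_, ?_⟩
    · rw [List.getD_eq_getElem _ _ (by omega)]
      exact hq.1
    · rw [List.getD_eq_getElem _ _ hi1]
      exact hq.2
  · rintro ⟨i, hi1, h1, h2⟩
    have hiz : i < (l.zip l.tail).length := by omega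
    refine ⟨(l.zip l.tail)[i], List.getElem_mem hiz, ?_⟩
    rw [List.getElem_zip, List.getElem_tail (by rw [List.length_tail]; omega)]
    rw [List.getD_eq_getElem _ _ (by omega)] at h1
    rw [List.getD_eq_getElem _ _ hi1] at h2
    simp only [Bool.and_eq_true]
    exact ⟨h1, h2⟩

theorem adj_inner_iff (d : Int) (l : List (List Int)) :
    (((l.zip l.tail).dropLast).any (fun p => p.1.all (fun x => x = d) && p.2.all (fun x => x = d)) = true)
      ↔ ∃ i : Nat, i + 2 < l.length ∧ (l.getD i []).all (fun x => x = d) = true ∧ (l.getD (i+1) []).all (fun x => x = d) = true := by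
  have hlenz : (l.zip l.tail).length = l.length - 1 := by
    rw [List.length_zip, List.length_tail]
    omega
  have hlen : ((l.zip l.tail).dropLast).length = l.length - 2 := by
    rw [List.length_dropLast]
    omega
  rw [List.any_eq_true]
  constructor
  · rintro ⟨p, hp, hq⟩
    obtain ⟨i, hi, hgi⟩ := List.mem_iff_getElem.mp hp
    have hi2 : i + 2 < l.length := by omega
    rw [List.getElem_dropLast, List.getElem_zip, List.getElem_tail (by rw [List.length_tail]; omega)] at hgi
    rw [← hgi] at hq
    simp only [Bool.and_eq_true] at hq
    refine ⟨i, hi2, ?_, ?_⟩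
    · rw [List.getD_eq_getElem _ _ (by omega)]
      exact hq.1
    · rw [List.getD_eq_getElem _ _ (by omega)]
      exact hq.2
  · rintro ⟨i, hi2, h1, h2⟩
    have hiz : i < ((l.zip l.tail).dropLast).length := by omega
    refine ⟨((l.zip l.tail).dropLast)[i], List.getElem_mem hiz, ?_⟩
    rw [List.getElem_dropLast, List.getElem_zip, List.getElem_tail (by rw [List.length_tail]; omega)]
    rw [List.getD_eq_getElem _ _ (by omega)] at h1
    rw [List.getD_eq_getElem _ _ (by omega)] at h2
    simp only [Bool.and_eq_true]
    exact ⟨h1, h2⟩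

theorem pvAdjB_cons2 (a b : Bool) (t : List Bool) : pvAdjB (a :: b :: t) = ((a && b) || pvAdjB (b :: t)) := rfl

theorem pvAdjB_eq_any : ∀ l : List Bool, pvAdjB l = (l.zip l.tail).any (fun p => p.1 && p.2) := by
  intro l
  induction l with
  | nil => rfl
  | cons a t ih =>
    cases t with
    | nil => rfl
    | cons b t2 =>
      rw [pvAdjB_cons2, ih]
      simp [List.zip_cons_cons, List.any_cons]

theorem pvAdjInnerB_cons3 (a b c : Bool) (t : List Bool) : pvAdjInnerB (a :: b :: c :: t) = ((a && b) || pvAdjInnerB (b :: c :: t)) := rfl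

theorem pvAdjInnerB_eq_any : ∀ l : List Bool, pvAdjInnerB l = ((l.zip l.tail).dropLast).any (fun p => p.1 && p.2) := by
  intro l
  induction l with
  | nil => rfl
  | cons a t ih =>
    cases t with
    | nil => rfl
    | cons b t2 =>
      cases t2 with
      | nil => rfl
      | cons c t3 =>
        rw [pvAdjInnerB_cons3, ih]
        simp [List.zip_cons_cons, List.dropLast_cons₂, List.any_cons]

theorem pvDropLast_map {α β : Type} (f : α → β) : ∀ l : List α, (l.map f).dropLast = l.dropLast.map f := by
  intro l
  induction l with
  | nil => rfl
  | cons a t ih =>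
    cases t with
    | nil => rfl
    | cons b t2 =>
      simp [List.dropLast, ih]

theorem pvPairComp (d : Int) :
    ((fun p : Bool × Bool => p.1 && p.2) ∘ Prod.map (fun s : List Int => s.all (fun x => x = d)) (fun s : List Int => s.all (fun x => x = d)))
      = (fun p : List Int × List Int => p.1.all (fun x => x = d) && p.2.all (fun x => x = d)) := by
  funext p
  rcases p with ⟨x, y⟩
  rfl

theorem adjB_iff (d : Int) (pattern : List (List Int)) :
    (pvAdjB (pattern.map (fun s => s.all (fun x => x = d))) = true)
      ↔ ∃ i : Nat, i + 1 < pattern.length ∧ (pattern.getD i []).all (fun x => x = d) = true ∧ (pattern.getD (i+1) []).all (fun x => x = d) = true := by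
  rw [pvAdjB_eq_any, ← List.map_tail, List.zip_map, List.any_map, pvPairComp]
  exact adj_any_iff d pattern

theorem adjInnerB_iff (d : Int) (pattern : List (List Int)) :
    (pvAdjInnerB (pattern.map (fun s => s.all (fun x => x = d))) = true)
      ↔ ∃ i : Nat, i + 2 < pattern.length ∧ (pattern.getD i []).all (fun x => x = d) = true ∧ (pattern.getD (i+1) []).all (fun x => x = d) = true := by
  rw [pvAdjInnerB_eq_any, ← List.map_tail, List.zip_map, pvDropLast_map, List.any_map, pvPairComp]
  exact adj_inner_iff d pattern

-- ===== VERDICT (by name: the statements are the Claim_ definitions above) =====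
theorem del_elem_in_ptn_spec : Claim_equal_del_elem_in_ptn := by
  intro d pattern _hDom hPre
  unfold Spec_del_elem_in_ptn
  unfold del_elem_in_ptn
  rw [phase1_eq_map, alt_eq_filter_map]
  set F := pattern.map (fun s => s.filter (fun x => x ≠ d)) with hF
  have hlenF : F.length = pattern.length := by simp [hF]
  have hgetD : ∀ i : Nat, i < pattern.length → F.getD i [] = (pattern.getD i []).filter (fun x => x ≠ d) := by
    intro i hi
    rw [List.getD_eq_getElem _ _ (by omega : i < F.length), List.getD_eq_getElem _ _ hi]
    simp [hF]
  unfold Pre_del_elem_in_ptn at hPre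
  rcases hPre with ⟨hAdjF, _⟩ | ⟨hInnerF, hAdjT, hE2⟩
  · -- no two adjacent emptied rows anywhere: the deletion loop is exactly 'filter non-empty'
    apply delLoop_noAdj
    intro i hi hEi hEi1
    have hip : i + 1 < pattern.length := by omega
    have hEi' : (pattern.getD i []).all (fun x => x = d) = true := by
      rw [← emptyRow_iff, ← hgetD i (by omega)]; exact hEi
    have hEi1' : (pattern.getD (i+1) []).all (fun x => x = d) = true := by
      rw [← emptyRow_iff, ← hgetD (i+1) (by omega)]; exact hEi1
    have := (adjB_iff d pattern).mpr ⟨i, hip, hEi', hEi1'⟩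
    rw [hAdjF] at this
    exact Bool.false_ne_true this
  · -- the only two emptied rows are the final two
    obtain ⟨i, hi1, hEi', hEi1'⟩ := (adjB_iff d pattern).mp hAdjT
    have hno2 : ¬ (i + 2 < pattern.length) := by
      intro h2
      have := (adjInnerB_iff d pattern).mpr ⟨i, h2, hEi', hEi1'⟩
      rw [hInnerF] at this
      exact Bool.false_ne_true this
    have hi2 : i + 2 = pattern.length := by omega
    have hcnt2 : pattern.countP (fun s => s.all (fun x => x = d)) ≤ 2 := le_of_eq hE2
    have hEi : F.getD i [] = [] := by
      rw [hgetD i (by omega), emptyRow_iff]; exact hEi'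
    have hEi1 : F.getD (i+1) [] = [] := by
      rw [hgetD (i+1) (by omega), emptyRow_iff]; exact hEi1'
    have hiF1 : i + 1 < F.length := by omega
    have hiF : i < F.length := by omega
    have hgi : F[i] = [] := by rw [← List.getD_eq_getElem _ _ hiF]; exact hEi
    have hgi1 : F[i+1] = [] := by rw [← List.getD_eq_getElem _ _ hiF1]; exact hEi1
    have hdrop : F.drop i = [[], []] := by
      rw [List.drop_eq_getElem_cons hiF, List.drop_eq_getElem_cons hiF1, hgi, hgi1]
      have : F.drop (i+1+1) = [] := List.drop_eq_nil_of_le (by omega)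
      rw [this]
    have hshape : F = F.take i ++ [[], []] := by
      conv_lhs => rw [← List.take_append_drop i F]
      rw [hdrop]
    have hcntF : F.countP (fun r => r = []) ≤ 2 := by
      rw [countP_bridge d pattern] at *
      exact hcnt2
    have hXcnt : (F.take i).countP (fun r => r = []) = 0 := by
      have h2 : F.countP (fun r => r = []) = (F.take i).countP (fun r => r = []) + 2 := by
        conv_lhs => rw [hshape]
        rw [List.countP_append]
        simp
      omega
    have hXne : ∀ r ∈ F.take i, r ≠ [] := by
      intro r hr hre
      have := List.countP_eq_zero.mp hXcnt r hr
      simp [hre] at this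
    rw [hshape, delLoop_trailing (F.take i) hXne]
    rw [List.filter_append, filter_self_of _ hXne]
    simp
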